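-- pv_equiv track=rewrite | github.com/mage-ai/llm_orchestration | conditionals/embeddings/clients.py | reduce_strings_to_length
-- ===== SOURCE A (Python) =====
-- from typing import Dict, List
--
-- def reduce_strings_to_length(strings: List[str], max_combined_length: int) -> List[str]:
--     """
--     Reduce a list of strings to ensure the combined length of the items does not exceed max_combined_length.
--
--     Args:
--         strings (List[str]): The list of strings to reduce.
--         max_combined_length (int): The maximum combined length of the strings in the result.
--
--     Returns:
--         List[str]: A list of strings with combined length not exceeding max_combined_length.
--     """
--     combined_length = 0
--     result = []
--
--     for string in strings:
--         if combined_length + len(string) > max_combined_length: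
--             break
--         result.append(string)
--         combined_length += len(string)
--
--     return result
-- ===== SOURCE B (Python) =====
-- def reduce_strings_to_length(strings, max_combined_length):
--     # Prefix-sum table of lengths, then binary-search (bisect_right) for the
--     # cut point: number of prefix sums <= max_combined_length.
--     cum = []
--     total = 0
--     for s in strings:
--         total += len(s)
--         cum.append(total)
--     lo, hi = 0, len(cum)
--     while lo < hi:
--         mid = (lo + hi) // 2
--         if max_combined_length < cum[mid]:
--             hi = mid
--         else:
--             lo = mid + 1
--     return strings[:lo]
-- ===== Notes on version B (the rewrite author's own statement) =====
-- stated objective: alternative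
-- what changed: Replaces the incremental scan-with-break by a precomputed prefix-sum table of lengths plus a hand-written bisect_right binary search that finds the cut point, then slices the list.
import Mathlib
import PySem

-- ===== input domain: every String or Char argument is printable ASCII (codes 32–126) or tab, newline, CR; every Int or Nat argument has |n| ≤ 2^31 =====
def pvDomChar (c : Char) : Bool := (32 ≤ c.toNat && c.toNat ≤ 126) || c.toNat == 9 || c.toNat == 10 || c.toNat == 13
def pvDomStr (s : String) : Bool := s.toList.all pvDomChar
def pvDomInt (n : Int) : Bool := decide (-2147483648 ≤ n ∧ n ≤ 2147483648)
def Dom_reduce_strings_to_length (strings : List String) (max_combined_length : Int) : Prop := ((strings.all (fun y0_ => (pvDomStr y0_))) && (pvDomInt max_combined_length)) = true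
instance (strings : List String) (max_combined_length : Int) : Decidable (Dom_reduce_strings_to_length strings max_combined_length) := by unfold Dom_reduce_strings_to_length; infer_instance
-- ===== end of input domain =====

-- B: prefix-sum table of lengths + bisect_right binary search instead of A's scan-with-break; alternative decomposition, same cost.

-- ===== PORT A =====
-- the for-loop with break: on break (or end of list) the collected result is returned
def rLoopA (m : Int) : List String → Int → List String
  | [], _ => []
  | s :: rest, combined =>
    if combined + PySem.Str.len s > m then []
    else s :: rLoopA m rest (combined + PySem.Str.len s)

def reduce_strings_to_length (strings : List String) (max_combined_length : Int) : List String :=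
  rLoopA max_combined_length strings 0

-- ===== PORT B =====
-- the first loop of Source B: cum.append(total) with running total
def cumFrom (total : Int) : List String → List Int
  | [] => []
  | s :: rest => (total + PySem.Str.len s) :: cumFrom (total + PySem.Str.len s) rest

-- the while-loop of Source B: hand-written bisect_right on cum; structural fuel makes the
-- loop total (hi - lo shrinks every iteration, so fuel = cum.length always suffices)
def bisectGo (cum : List Int) (x : Int) : Nat → Nat → Nat → Nat
  | 0, lo, _ => lo
  | fuel + 1, lo, hi =>
    if lo < hi then
      let mid := (lo + hi) / 2
      if x < cum.getD mid 0 then bisectGo cum x fuel lo mid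
      else bisectGo cum x fuel (mid + 1) hi
    else lo

def reduce_strings_to_length_alt (strings : List String) (max_combined_length : Int) : List String :=
  let cum := cumFrom 0 strings
  let lo := bisectGo cum max_combined_length cum.length 0 cum.length
  strings.take lo

-- ===== PRECONDITION & SPEC =====
def Spec_reduce_strings_to_length (strings : List String) (max_combined_length : Int) (out : List String) : Prop := out = reduce_strings_to_length_alt strings max_combined_length
instance (strings : List String) (max_combined_length : Int) (out : List String) : Decidable (Spec_reduce_strings_to_length strings max_combined_length out) := by unfold Spec_reduce_strings_to_length; infer_instance

-- ===== CLAIM (what is proved, stated in full; the proofs are below) =====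
def Claim_equal_reduce_strings_to_length : Prop := ∀ (strings : List String) (max_combined_length : Int), Dom_reduce_strings_to_length strings max_combined_length → Spec_reduce_strings_to_length strings max_combined_length (reduce_strings_to_length strings max_combined_length)

-- ===== LEMMAS AND PROOFS =====

-- every entry of cumFrom total l is ≥ total (string lengths are nonnegative)
theorem cumFrom_lower (total : Int) (l : List String) :
    ∀ c ∈ cumFrom total l, total ≤ c := by
  induction l generalizing total with
  | nil => simp [cumFrom]
  | cons s rest ih =>
    intro c hc
    have hlen : 0 ≤ PySem.Str.len s := by simp [PySem.Str.len_eq]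
    simp [cumFrom] at hc
    rcases hc with h | h
    · omega
    · have := ih (total + PySem.Str.len s) c h; omega

-- the prefix-sum table is sorted
theorem cumFrom_sorted (total : Int) (l : List String) :
    (cumFrom total l).Pairwise (· ≤ ·) := by
  induction l generalizing total with
  | nil => simp [cumFrom]
  | cons s rest ih =>
    simp only [cumFrom, List.pairwise_cons]
    exact ⟨fun c hc => cumFrom_lower _ _ c hc, ih _⟩

-- in a sorted list, an index is below the takeWhile-(≤ m) length iff the element there is ≤ m
theorem tw_index_char (m : Int) (l : List Int) (hs : l.Pairwise (· ≤ ·)) :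
    ∀ i, i < l.length →
      (i < (l.takeWhile (fun c => decide (c ≤ m))).length ↔ l.getD i 0 ≤ m) := by
  induction l with
  | nil => intro i h; simp at h
  | cons a t ih =>
    rcases List.pairwise_cons.mp hs with ⟨ha, ht⟩
    intro i hi
    by_cases ham : a ≤ m
    · cases i with
      | zero => simp [List.takeWhile, ham]
      | succ j =>
        have hj : j < t.length := by simpa using hi
        have := ih ht j hj
        simp only [List.takeWhile, ham, decide_true, List.length_cons, List.getD_cons_succ]
        omega
    · cases i with
      | zero => simp [List.takeWhile, ham]
      | succ j =>
        have hj : j < t.length := by simpa using hi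
        have hmem : t.getD j 0 ∈ t := by
          rw [List.getD_eq_getElem _ _ hj]; exact List.getElem_mem hj
        have hle := ha _ hmem
        simp only [List.takeWhile, ham, decide_false, List.length_nil, List.getD_cons_succ]
        constructor
        · intro h; omega
        · intro h; omega

-- the binary search returns the takeWhile length, given the bracketing invariant
theorem bisectGo_eq_aux (l : List Int) (m : Int) (hs : l.Pairwise (· ≤ ·)) :
    ∀ fuel lo hi, hi - lo ≤ fuel → hi ≤ l.length →
      lo ≤ (l.takeWhile (fun c => decide (c ≤ m))).length →
      (l.takeWhile (fun c => decide (c ≤ m))).length ≤ hi →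
      bisectGo l m fuel lo hi = (l.takeWhile (fun c => decide (c ≤ m))).length := by
  intro fuel
  induction fuel with
  | zero => intro lo hi hd hhi hlo hk; simp only [bisectGo]; omega
  | succ fuel ih =>
  intro lo hi hd hhi hlo hk
  rw [bisectGo]
  by_cases hlt : lo < hi
  · simp only [hlt, if_true]
    set k := (l.takeWhile (fun c => decide (c ≤ m))).length with hkdef
    have hmid1 : lo ≤ (lo + hi) / 2 := by omega
    have hmid2 : (lo + hi) / 2 < hi := by omega
    have hmidlen : (lo + hi) / 2 < l.length := by omega
    have hchar := tw_index_char m l hs ((lo + hi) / 2) hmidlen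
    by_cases hC : m < l.getD ((lo + hi) / 2) 0
    · have hk2 : k ≤ (lo + hi) / 2 := by
        by_contra h
        have := hchar.mp (by omega)
        omega
      simp only [hC, if_true]
      exact ih lo ((lo + hi) / 2) (by omega) (by omega) hlo hk2
    · have hmk : ((lo + hi) / 2) < k := hchar.mpr (by omega)
      simp only [hC, if_false]
      exact ih ((lo + hi) / 2 + 1) hi (by omega) hhi (by omega) hk
  · simp only [hlt, if_false]
    omega

-- A's loop takes exactly the takeWhile-length prefix
theorem rLoopA_eq_take (m : Int) (l : List String) :
    ∀ total, rLoopA m l total =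
      l.take ((cumFrom total l).takeWhile (fun c => decide (c ≤ m))).length := by
  induction l with
  | nil => intro total; simp [rLoopA, cumFrom]
  | cons s rest ih =>
    intro total
    rw [show rLoopA m (s :: rest) total =
          (if total + PySem.Str.len s > m then []
           else s :: rLoopA m rest (total + PySem.Str.len s)) from rfl,
        show cumFrom total (s :: rest) =
          (total + PySem.Str.len s) :: cumFrom (total + PySem.Str.len s) rest from rfl,
        List.takeWhile_cons]
    by_cases hb : total + PySem.Str.len s > m
    · rw [if_pos hb, if_neg (by simpa using (by omega : ¬ (total + PySem.Str.len s ≤ m)))]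
      simp
    · rw [if_neg hb, if_pos (by simpa using (by omega : total + PySem.Str.len s ≤ m))]
      simp only [List.length_cons, List.take_succ_cons]
      rw [ih]

-- ===== VERDICT (by name: the statement is the Claim_ definition above) =====
theorem reduce_strings_to_length_spec : Claim_equal_reduce_strings_to_length := by
  intro strings m _
  unfold Spec_reduce_strings_to_length reduce_strings_to_length reduce_strings_to_length_alt
  show rLoopA m strings 0 =
    List.take (bisectGo (cumFrom 0 strings) m (cumFrom 0 strings).length 0
      (cumFrom 0 strings).length) strings
  have hs := cumFrom_sorted 0 strings
  have hlen : ((cumFrom 0 strings).takeWhile (fun c => decide (c ≤ m))).length ≤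
      (cumFrom 0 strings).length := (List.takeWhile_prefix _).length_le
  rw [bisectGo_eq_aux (cumFrom 0 strings) m hs (cumFrom 0 strings).length 0
    (cumFrom 0 strings).length (by omega) le_rfl (Nat.zero_le _) hlen]
  exact rLoopA_eq_take m strings 0
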